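-- pv_equiv track=rewrite | github.com/amol-ship-it/agi-core | domains/arc/primitives.py | fill_by_symmetry
-- ===== SOURCE A (Python) =====
-- Grid = list[list[int]]
--
-- def fill_by_symmetry(grid: Grid) -> Grid:
--     """Fill masked rectangular region using the grid's symmetry."""
--     if not grid or not grid[0]:
--         return grid
--     h, w = len(grid), len(grid[0])
--
--     def find_mask_rect(mask_c: int):
--         cells = [(r, c) for r in range(h) for c in range(w) if grid[r][c] == mask_c]
--         if not cells:
--             return None
--         rs = [r for r, _ in cells]
--         cs = [c for _, c in cells]
--         r0, r1, c0, c1 = min(rs), max(rs), min(cs), max(cs)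
--         for r in range(r0, r1 + 1):
--             for c in range(c0, c1 + 1):
--                 if grid[r][c] != mask_c:
--                     return None
--         return r0, c0, r1, c1
--
--     for mask_c in range(1, 10):
--         rect = find_mask_rect(mask_c)
--         if rect is None:
--             continue
--         r0, c0, r1, c1 = rect
--         for sym_fn in [
--             lambda r, c: (h - 1 - r, w - 1 - c),  # 180 rot
--             lambda r, c: (h - 1 - r, c),            # V mirror
--             lambda r, c: (r, w - 1 - c),            # H mirror
--         ]:
--             result = [row[:] for row in grid]
--             filled = True
--             for r in range(r0, r1 + 1):
--                 for c in range(c0, c1 + 1):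
--                     sr, sc = sym_fn(r, c)
--                     if 0 <= sr < h and 0 <= sc < w and grid[sr][sc] != mask_c:
--                         result[r][c] = grid[sr][sc]
--                     else:
--                         filled = False
--             if filled:
--                 return result
--     return [row[:] for row in grid]
-- ===== SOURCE B (Python) =====
-- Grid = list[list[int]]
--
-- def fill_by_symmetry(grid: Grid) -> Grid:
--     """Fill masked rectangular region using the grid's symmetry.
--
--     One pass over the grid builds per-color stats (count + bounding box);
--     a color's mask region is a solid rectangle iff count == box area, so no
--     rescan of the box is needed.  The filled result is built functionally.
--     """
--     if not grid or not grid[0]: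
--         return grid
--     h, w = len(grid), len(grid[0])
--
--     stats = {}  # color -> (count, r0, r1, c0, c1)
--     for r in range(h):
--         for c in range(w):
--             v = grid[r][c]
--             s = stats.get(v)
--             if s is None:
--                 stats[v] = (1, r, r, c, c)
--             else:
--                 n, r0, r1, c0, c1 = s
--                 stats[v] = (n + 1, min(r0, r), max(r1, r), min(c0, c), max(c1, c))
--
--     for mask_c in range(1, 10):
--         s = stats.get(mask_c)
--         if s is None:
--             continue
--         n, r0, r1, c0, c1 = s
--         if n != (r1 - r0 + 1) * (c1 - c0 + 1):
--             continue  # the mask cells do not form a solid rectangle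
--         for sym in (
--             lambda r, c: (h - 1 - r, w - 1 - c),  # 180 rot
--             lambda r, c: (h - 1 - r, c),          # V mirror
--             lambda r, c: (r, w - 1 - c),          # H mirror
--         ):
--             block = [[grid[sym(r, c)[0]][sym(r, c)[1]] for c in range(c0, c1 + 1)]
--                      for r in range(r0, r1 + 1)]
--             if all(v != mask_c for row in block for v in row):
--                 return [
--                     [block[r - r0][c - c0] if r0 <= r <= r1 and c0 <= c <= c1 else x
--                      for c, x in enumerate(row)]
--                     for r, row in enumerate(grid)
--                 ]
--     return [row[:] for row in grid]
-- ===== Notes on version B (the rewrite author's own statement) =====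
-- stated objective: alternative
-- what changed: A scans the whole grid once per candidate mask color (building a cell list, four min/max passes, then rescanning the bounding box to check solidity, and fills by mutating a copied grid with per-cell range checks); B makes ONE pass over the grid building a dict of per-color stats (count + bounding box), decides solidity arithmetically by count == box area with no rescan, and builds the filled result functionally from a precomputed reflected block.
import Mathlib
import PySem

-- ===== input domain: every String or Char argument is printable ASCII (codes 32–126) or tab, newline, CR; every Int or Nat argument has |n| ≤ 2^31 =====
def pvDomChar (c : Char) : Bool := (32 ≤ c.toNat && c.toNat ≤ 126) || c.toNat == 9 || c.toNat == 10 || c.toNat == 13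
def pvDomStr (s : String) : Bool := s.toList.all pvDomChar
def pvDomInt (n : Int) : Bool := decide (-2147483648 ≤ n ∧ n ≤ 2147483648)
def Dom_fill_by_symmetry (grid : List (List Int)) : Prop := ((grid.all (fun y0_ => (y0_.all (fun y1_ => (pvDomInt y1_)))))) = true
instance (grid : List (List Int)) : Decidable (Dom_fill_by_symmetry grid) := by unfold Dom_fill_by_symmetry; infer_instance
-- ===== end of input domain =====

-- B is an alternative implementation: one pass building per-color bounding-box stats with a
-- count == area solidity test instead of one full-grid scan per color plus a box rescan, and a
-- functional construction of the result instead of mutation.  Same return value; A mutates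
-- nothing observable (it copies), so return-value equivalence is full equivalence.

-- ===== PORT A =====
-- shared with the B port: grid[r][c] (total form; Pre_ keeps every used index in range)
def pvAt (grid : List (List Int)) (r c : Int) : Int :=
  PySem.List.pyGetD (PySem.List.pyGetD grid r []) c 0

-- the three symmetry maps, in A's order (shared constant)
def pvSyms (h w : Int) : List (Int → Int → Int × Int) :=
  [fun r c => (h - 1 - r, w - 1 - c), fun r c => (h - 1 - r, c), fun r c => (r, w - 1 - c)]

-- cells = [(r, c) for r in range(h) for c in range(w) if grid[r][c] == mask_c]
def pvCellsA (grid : List (List Int)) (h w m : Int) : List (Int × Int) :=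
  (PySem.List.pyRange 0 h 1).foldl (fun acc r =>
    (PySem.List.pyRange 0 w 1).foldl (fun acc c =>
      if pvAt grid r c = m then acc ++ [(r, c)] else acc) acc) []

-- find_mask_rect (the early-return box scan is the equivalent nested `all`)
def pvFindRectA (grid : List (List Int)) (h w m : Int) : Option (Int × Int × Int × Int) :=
  let cells := pvCellsA grid h w m
  if cells.isEmpty then none
  else
    let rs := cells.map Prod.fst
    let cs := cells.map Prod.snd
    let r0 := (PySem.List.min? rs (fun y => y)).getD 0
    let r1 := (PySem.List.max? rs (fun y => y)).getD 0
    let c0 := (PySem.List.min? cs (fun y => y)).getD 0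
    let c1 := (PySem.List.max? cs (fun y => y)).getD 0
    if (PySem.List.pyRange r0 (r1 + 1) 1).all (fun r =>
        (PySem.List.pyRange c0 (c1 + 1) 1).all (fun c => pvAt grid r c = m))
    then some (r0, c0, r1, c1) else none

-- one symmetry attempt: result = [row[:] ...]; nested loops mutating (result, filled)
def pvTryFillA (grid : List (List Int)) (h w m r0 c0 r1 c1 : Int)
    (sym : Int → Int → Int × Int) : Option (List (List Int)) :=
  let init := grid.map (fun row => PySem.List.slice row none none)
  let st := (PySem.List.pyRange r0 (r1 + 1) 1).foldl (fun st r =>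
      (PySem.List.pyRange c0 (c1 + 1) 1).foldl (fun (st : List (List Int) × Bool) c =>
        let sr := (sym r c).1
        let sc := (sym r c).2
        if 0 ≤ sr ∧ sr < h ∧ 0 ≤ sc ∧ sc < w ∧ pvAt grid sr sc ≠ m then
          (PySem.List.pySetD st.1 r
            (PySem.List.pySetD (PySem.List.pyGetD st.1 r []) c (pvAt grid sr sc)), st.2)
        else (st.1, false)) st) (init, true)
  if st.2 then some st.1 else none

-- for mask_c in range(1, 10): ... (continue = tail recursion on the remaining colors)
def pvLoopA (grid : List (List Int)) (h w : Int) : List Int → List (List Int)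
  | [] => grid.map (fun row => PySem.List.slice row none none)
  | m :: rest =>
    match pvFindRectA grid h w m with
    | none => pvLoopA grid h w rest
    | some (r0, c0, r1, c1) =>
      match (pvSyms h w).findSome? (fun s => pvTryFillA grid h w m r0 c0 r1 c1 s) with
      | some res => res
      | none => pvLoopA grid h w rest

def fill_by_symmetry (grid : List (List Int)) : List (List Int) :=
  if grid.isEmpty ∨ (PySem.List.pyGetD grid 0 []).isEmpty then grid
  else
    pvLoopA grid (grid.length : Int) ((PySem.List.pyGetD grid 0 []).length : Int)
      (PySem.List.pyRange 1 10 1)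

-- ===== PORT B =====
-- stats update for one cell of color already carrying stats s
def pvUpdB (s : Option (Int × Int × Int × Int × Int)) (r c : Int) :
    Int × Int × Int × Int × Int :=
  match s with
  | none => (1, r, r, c, c)
  | some (n, r0, r1, c0, c1) => (n + 1, min r0 r, max r1 r, min c0 c, max c1 c)

-- one pass: stats = {} ; stats[v] = updated tuple
def pvStatsB (grid : List (List Int)) (h w : Int) :
    PySem.Dict Int (Int × Int × Int × Int × Int) :=
  (PySem.List.pyRange 0 h 1).foldl (fun d r =>
    (PySem.List.pyRange 0 w 1).foldl (fun d c =>
      d.insert (pvAt grid r c) (pvUpdB (d.get? (pvAt grid r c)) r c)) d) PySem.Dict.empty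

-- block = [[grid[sym(r,c)] for c in box cols] for r in box rows]
def pvBlockB (grid : List (List Int)) (r0 c0 r1 c1 : Int)
    (sym : Int → Int → Int × Int) : List (List Int) :=
  (PySem.List.pyRange r0 (r1 + 1) 1).map (fun r =>
    (PySem.List.pyRange c0 (c1 + 1) 1).map (fun c => pvAt grid (sym r c).1 (sym r c).2))

def pvTryFillB (grid : List (List Int)) (m r0 c0 r1 c1 : Int)
    (sym : Int → Int → Int × Int) : Option (List (List Int)) :=
  let block := pvBlockB grid r0 c0 r1 c1 sym
  if block.all (fun row => row.all (fun v => v ≠ m)) then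
    some ((PySem.List.enumerate grid 0).map (fun p =>
      (PySem.List.enumerate p.2 0).map (fun q =>
        if r0 ≤ p.1 ∧ p.1 ≤ r1 ∧ c0 ≤ q.1 ∧ q.1 ≤ c1 then
          pvAt block (p.1 - r0) (q.1 - c0)
        else q.2)))
  else none

def pvLoopB (grid : List (List Int)) (h w : Int)
    (stats : PySem.Dict Int (Int × Int × Int × Int × Int)) : List Int → List (List Int)
  | [] => grid.map (fun row => PySem.List.slice row none none)
  | m :: rest =>
    match stats.get? m with
    | none => pvLoopB grid h w stats rest
    | some (n, r0, r1, c0, c1) =>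
      if n ≠ (r1 - r0 + 1) * (c1 - c0 + 1) then pvLoopB grid h w stats rest
      else
        match (pvSyms h w).findSome? (fun s => pvTryFillB grid m r0 c0 r1 c1 s) with
        | some res => res
        | none => pvLoopB grid h w stats rest

def fill_by_symmetry_alt (grid : List (List Int)) : List (List Int) :=
  if grid.isEmpty ∨ (PySem.List.pyGetD grid 0 []).isEmpty then grid
  else
    let h : Int := (grid.length : Int)
    let w : Int := ((PySem.List.pyGetD grid 0 []).length : Int)
    pvLoopB grid h w (pvStatsB grid h w) (PySem.List.pyRange 1 10 1)

-- ===== PRECONDITION & SPEC =====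
-- Pre_ excludes exactly the grids on which A raises IndexError: a row shorter than the first
-- row (the scan reads grid[r][c] for every c < len(grid[0])).  A returns on every other input.
def Pre_fill_by_symmetry (grid : List (List Int)) : Prop :=
  ∀ row ∈ grid, (PySem.List.pyGetD grid 0 []).length ≤ row.length
instance (grid : List (List Int)) : Decidable (Pre_fill_by_symmetry grid) := by
  unfold Pre_fill_by_symmetry; infer_instance

def pvWitness_fill_by_symmetry : List (List Int) := [[5, 1, 1], [2, 1, 1], [9, 4, 4]]

def Spec_fill_by_symmetry (grid : List (List Int)) (out : List (List Int)) : Prop :=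
  out = fill_by_symmetry_alt grid
instance (grid : List (List Int)) (out : List (List Int)) :
    Decidable (Spec_fill_by_symmetry grid out) := by unfold Spec_fill_by_symmetry; infer_instance

-- ===== CLAIM (what is proved, stated in full; the proofs are below) =====
def Claim_equal_fill_by_symmetry : Prop :=
  ∀ (grid : List (List Int)), Dom_fill_by_symmetry grid → Pre_fill_by_symmetry grid →
    Spec_fill_by_symmetry grid (fill_by_symmetry grid)



-- ===== LEMMAS AND PROOFS =====
def pvAllCells (h w : Int) : List (Int × Int) :=
  (PySem.List.pyRange 0 h 1).flatMap (fun r => (PySem.List.pyRange 0 w 1).map (fun c => (r, c)))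

theorem L1 (grid : List (List Int)) (h w m : Int) :
    ((PySem.List.pyRange 0 h 1).foldl (fun acc r =>
      (PySem.List.pyRange 0 w 1).foldl (fun acc c =>
        if pvAt grid r c = m then acc ++ [(r, c)] else acc) acc) []) =
    (pvAllCells h w).filter (fun p => decide (pvAt grid p.1 p.2 = m)) := by
  rw [PySem.List.foldl_congr_mem _ _ (fun acc r =>
      acc ++ ((PySem.List.pyRange 0 w 1).filter (fun c => decide (pvAt grid r c = m))).map
        (fun c => (r, c))) _
    (fun acc r _ => PySem.List.foldl_append_ite (p := fun c => pvAt grid r c = m)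
      (f := fun c => (r, c)) _ acc)]
  rw [PySem.List.foldl_append_eq_flatMap]
  simp [pvAllCells, List.filter_flatMap, List.filter_map, Function.comp_def]

theorem L2 {σ : Type} (h w : Int) (f : σ → Int × Int → σ) (i : σ) :
    (PySem.List.pyRange 0 h 1).foldl (fun d r =>
      (PySem.List.pyRange 0 w 1).foldl (fun d c => f d (r, c)) d) i
    = (pvAllCells h w).foldl f i := by
  rw [pvAllCells, List.foldl_flatMap]
  exact PySem.List.foldl_congr_mem _ _ _ _ (fun d r _ => by rw [List.foldl_map])

theorem L3 (L : List (Int × Int)) (key : Int × Int → Int)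
    (d : PySem.Dict Int (Int × Int × Int × Int × Int)) (m : Int) :
    (L.foldl (fun d p => d.insert (key p) (pvUpdB (d.get? (key p)) p.1 p.2)) d).get? m
    = (L.filter (fun p => decide (key p = m))).foldl
        (fun s p => some (pvUpdB s p.1 p.2)) (d.get? m) := by
  induction L generalizing d with
  | nil => rfl
  | cons p t ih =>
    rw [List.foldl_cons, ih]
    by_cases hk : key p = m
    · rw [List.filter_cons_of_pos (by simpa using hk), List.foldl_cons,
        PySem.Dict.get?_insert, if_pos hk.symm, hk]
    · rw [List.filter_cons_of_neg (by simpa using hk),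
        PySem.Dict.get?_insert, if_neg (fun e => hk e.symm)]

theorem L4 (t : List (Int × Int)) (n r0 r1 c0 c1 : Int) :
    t.foldl (fun s p => some (pvUpdB s p.1 p.2)) (some (n, r0, r1, c0, c1))
    = some (n + t.length, (t.map Prod.fst).foldl min r0, (t.map Prod.fst).foldl max r1,
        (t.map Prod.snd).foldl min c0, (t.map Prod.snd).foldl max c1) := by
  induction t generalizing n r0 r1 c0 c1 with
  | nil => simp
  | cons p t ih =>
    rw [List.foldl_cons, show pvUpdB (some (n, r0, r1, c0, c1)) p.1 p.2
        = (n + 1, min r0 p.1, max r1 p.1, min c0 p.2, max c1 p.2) from rfl, ih]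
    simp only [List.map_cons, List.foldl_cons, List.length_cons, Option.some.injEq,
      Prod.mk.injEq]
    push_cast; ring_nf; simp
def pvBox (r0 c0 r1 c1 : Int) : List (Int × Int) :=
  (PySem.List.pyRange r0 (r1 + 1) 1).flatMap
    (fun r => (PySem.List.pyRange c0 (c1 + 1) 1).map (fun c => (r, c)))

theorem mem_allCells (h w : Int) (p : Int × Int) :
    p ∈ pvAllCells h w ↔ 0 ≤ p.1 ∧ p.1 < h ∧ 0 ≤ p.2 ∧ p.2 < w := by
  cases p
  simp [pvAllCells, List.mem_flatMap, PySem.List.mem_pyRange_one]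
  tauto

-- range filter
theorem filter_range (n a b : Int) (h0 : 0 ≤ a) (hab : a ≤ b) (hbn : b < n) :
    (PySem.List.pyRange 0 n 1).filter (fun x => decide (a ≤ x ∧ x ≤ b))
    = PySem.List.pyRange a (b + 1) 1 := by
  rw [PySem.List.pyRange_one_append 0 a n h0 (by omega),
      PySem.List.pyRange_one_append a (b + 1) n (by omega) (by omega), List.filter_append,
      List.filter_append]
  rw [List.filter_eq_nil_iff.mpr (by intro x hx; simp [PySem.List.mem_pyRange_one] at hx ⊢; omega),
      List.filter_eq_self.mpr (by intro x hx; simp [PySem.List.mem_pyRange_one] at hx ⊢; omega),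
      List.filter_eq_nil_iff.mpr (by intro x hx; simp [PySem.List.mem_pyRange_one] at hx ⊢; omega)]
  simp

-- allCells filtered by the box condition is the box
theorem filter_inBox (h w r0 c0 r1 c1 : Int) (h1 : 0 ≤ r0) (h2 : r0 ≤ r1) (h3 : r1 < h)
    (h4 : 0 ≤ c0) (h5 : c0 ≤ c1) (h6 : c1 < w) :
    (pvAllCells h w).filter (fun p => decide (r0 ≤ p.1 ∧ p.1 ≤ r1 ∧ c0 ≤ p.2 ∧ p.2 ≤ c1))
    = pvBox r0 c0 r1 c1 := by
  have nilrow : ∀ r : Int, ¬ (r0 ≤ r ∧ r ≤ r1) →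
      ((fun r => List.filter (fun p : Int × Int => decide (r0 ≤ p.1 ∧ p.1 ≤ r1 ∧ c0 ≤ p.2 ∧ p.2 ≤ c1))
        (List.map (fun c => (r, c)) (PySem.List.pyRange 0 w 1))) r) = [] := by
    intro r hr
    apply List.filter_eq_nil_iff.mpr
    intro p hp
    simp only [List.mem_map] at hp
    obtain ⟨c, _, rfl⟩ := hp
    simp; omega
  rw [pvAllCells, List.filter_flatMap]
  rw [PySem.List.pyRange_one_append 0 r0 h h1 (by omega),
      PySem.List.pyRange_one_append r0 (r1 + 1) h (by omega) (by omega), List.flatMap_append,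
      List.flatMap_append]
  have e1 : ((PySem.List.pyRange 0 r0 1).flatMap
      (fun r => List.filter (fun p : Int × Int => decide (r0 ≤ p.1 ∧ p.1 ≤ r1 ∧ c0 ≤ p.2 ∧ p.2 ≤ c1))
        (List.map (fun c => (r, c)) (PySem.List.pyRange 0 w 1)))) = [] := by
    apply List.flatMap_eq_nil_iff.mpr
    intro r hr
    simp only [PySem.List.mem_pyRange_one] at hr
    exact nilrow r (by omega)
  have e3 : ((PySem.List.pyRange (r1 + 1) h 1).flatMap
      (fun r => List.filter (fun p : Int × Int => decide (r0 ≤ p.1 ∧ p.1 ≤ r1 ∧ c0 ≤ p.2 ∧ p.2 ≤ c1))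
        (List.map (fun c => (r, c)) (PySem.List.pyRange 0 w 1)))) = [] := by
    apply List.flatMap_eq_nil_iff.mpr
    intro r hr
    simp only [PySem.List.mem_pyRange_one] at hr
    exact nilrow r (by omega)
  rw [e1, e3, List.nil_append, List.append_nil, pvBox]
  apply List.flatMap_congr
  intro r hr
  simp only [PySem.List.mem_pyRange_one] at hr
  rw [List.filter_map]
  have hc : ((fun p : Int × Int => decide (r0 ≤ p.1 ∧ p.1 ≤ r1 ∧ c0 ≤ p.2 ∧ p.2 ≤ c1)) ∘ (fun c => (r, c)))
      = fun c => decide (c0 ≤ c ∧ c ≤ c1) := by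
    funext c; simp [hr.1]; intro _ _; omega
  rw [hc, filter_range w c0 c1 h4 h5 h6]


theorem filter_len_iff (p : Int × Int → Bool) (l : List (Int × Int)) :
    (l.filter p).length = l.length ↔ ∀ x ∈ l, p x := by
  constructor
  · intro h x hx
    have := List.Sublist.eq_of_length (List.filter_sublist (l := l) (p := p)) h
    rw [← this] at hx
    exact List.of_mem_filter hx
  · intro h
    rw [List.filter_eq_self.mpr h]

theorem length_box (r0 c0 r1 c1 : Int) :
    (pvBox r0 c0 r1 c1).length = (r1 + 1 - r0).toNat * (c1 + 1 - c0).toNat := by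
  simp [pvBox, List.length_flatMap, PySem.List.length_pyRange_one]

theorem count_iff (P : Int × Int → Bool) (h w r0 c0 r1 c1 : Int)
    (h1 : 0 ≤ r0) (h2 : r0 ≤ r1) (h3 : r1 < h) (h4 : 0 ≤ c0) (h5 : c0 ≤ c1) (h6 : c1 < w)
    (hsub : ∀ p ∈ (pvAllCells h w).filter P, r0 ≤ p.1 ∧ p.1 ≤ r1 ∧ c0 ≤ p.2 ∧ p.2 ≤ c1) :
    ((((pvAllCells h w).filter P).length : Int) = (r1 - r0 + 1) * (c1 - c0 + 1))
    ↔ ∀ p ∈ pvBox r0 c0 r1 c1, P p := by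
  have hcells : (pvAllCells h w).filter P = (pvBox r0 c0 r1 c1).filter P := by
    rw [← filter_inBox h w r0 c0 r1 c1 h1 h2 h3 h4 h5 h6, List.filter_filter]
    apply List.filter_congr
    intro p hp
    by_cases hP : P p
    · have := hsub p (List.mem_filter.mpr ⟨hp, hP⟩)
      simp [hP, this]
    · simp [hP]
  rw [hcells, ← filter_len_iff P]
  rw [length_box]
  constructor
  · intro hl
    have : ((((pvBox r0 c0 r1 c1).filter P).length : Int))
        = (((r1 + 1 - r0).toNat * (c1 + 1 - c0).toNat : Nat) : Int) := by
      rw [hl]; push_cast [Int.toNat_of_nonneg (by omega : (0:Int) ≤ r1 + 1 - r0),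
        Int.toNat_of_nonneg (by omega : (0:Int) ≤ c1 + 1 - c0)]; ring
    exact_mod_cast this
  · intro hl
    rw [hl]
    push_cast [Int.toNat_of_nonneg (by omega : (0:Int) ≤ r1 + 1 - r0),
      Int.toNat_of_nonneg (by omega : (0:Int) ≤ c1 + 1 - c0)]
    ring
theorem rect_eq (grid : List (List Int)) (h w m : Int) :
    pvFindRectA grid h w m =
      (match (pvStatsB grid h w).get? m with
      | none => none
      | some (n, r0, r1, c0, c1) =>
        if n = (r1 - r0 + 1) * (c1 - c0 + 1) then some (r0, c0, r1, c1) else none) := by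
  have hstats : (pvStatsB grid h w).get? m
      = ((pvAllCells h w).filter (fun p => decide (pvAt grid p.1 p.2 = m))).foldl
          (fun s p => some (pvUpdB s p.1 p.2)) none := by
    rw [pvStatsB, L2 h w (fun d (p : Int × Int) =>
      PySem.Dict.insert d (pvAt grid p.1 p.2) (pvUpdB (d.get? (pvAt grid p.1 p.2)) p.1 p.2))
      PySem.Dict.empty, L3 (pvAllCells h w) (fun p => pvAt grid p.1 p.2) PySem.Dict.empty m]
    rfl
  have hcells : pvCellsA grid h w m
      = (pvAllCells h w).filter (fun p => decide (pvAt grid p.1 p.2 = m)) := L1 grid h w m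
  cases hc : (pvAllCells h w).filter (fun p => decide (pvAt grid p.1 p.2 = m)) with
  | nil =>
    rw [hstats, hc]
    simp [pvFindRectA, hcells, hc]
  | cons p t =>
    rw [hstats, hc, List.foldl_cons, show pvUpdB none p.1 p.2 = (1, p.1, p.1, p.2, p.2) from rfl,
      L4]
    have hmem : ∀ q ∈ p :: t, 0 ≤ q.1 ∧ q.1 < h ∧ 0 ≤ q.2 ∧ q.2 < w := by
      intro q hq
      rw [← hc] at hq
      exact (mem_allCells h w q).mp (List.mem_filter.mp hq).1
    set r0 := (t.map Prod.fst).foldl min p.1 with hr0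
    set r1 := (t.map Prod.fst).foldl max p.1 with hr1
    set c0 := (t.map Prod.snd).foldl min p.2 with hc0
    set c1 := (t.map Prod.snd).foldl max p.2 with hc1
    have hmin : PySem.List.min? ((p :: t).map Prod.fst) (fun y => y) = some r0 := by
      rw [List.map_cons, PySem.List.min?_id_cons]
    have hmax : PySem.List.max? ((p :: t).map Prod.fst) (fun y => y) = some r1 := by
      rw [List.map_cons, PySem.List.max?_id_cons]
    have hminc : PySem.List.min? ((p :: t).map Prod.snd) (fun y => y) = some c0 := by
      rw [List.map_cons, PySem.List.min?_id_cons]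
    have hmaxc : PySem.List.max? ((p :: t).map Prod.snd) (fun y => y) = some c1 := by
      rw [List.map_cons, PySem.List.max?_id_cons]
    have hr0mem : r0 ∈ (p :: t).map Prod.fst := PySem.List.min?_mem hmin
    have hr1mem : r1 ∈ (p :: t).map Prod.fst := PySem.List.max?_mem hmax
    have hc0mem : c0 ∈ (p :: t).map Prod.snd := PySem.List.min?_mem hminc
    have hc1mem : c1 ∈ (p :: t).map Prod.snd := PySem.List.max?_mem hmaxc
    have hlo : ∀ q ∈ p :: t, r0 ≤ q.1 ∧ q.1 ≤ r1 ∧ c0 ≤ q.2 ∧ q.2 ≤ c1 := by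
      intro q hq
      exact ⟨PySem.List.min?_isMin hmin _ (List.mem_map_of_mem hq),
        PySem.List.max?_isMax hmax _ (List.mem_map_of_mem hq),
        PySem.List.min?_isMin hminc _ (List.mem_map_of_mem hq),
        PySem.List.max?_isMax hmaxc _ (List.mem_map_of_mem hq)⟩
    have hb : 0 ≤ r0 ∧ r0 ≤ r1 ∧ r1 < h ∧ 0 ≤ c0 ∧ c0 ≤ c1 ∧ c1 < w := by
      obtain ⟨q1, hq1, e1⟩ := List.mem_map.mp hr0mem
      obtain ⟨q2, hq2, e2⟩ := List.mem_map.mp hr1mem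
      obtain ⟨q3, hq3, e3⟩ := List.mem_map.mp hc0mem
      obtain ⟨q4, hq4, e4⟩ := List.mem_map.mp hc1mem
      have b1 := hmem q1 hq1; have b2 := hmem q2 hq2
      have b3 := hmem q3 hq3; have b4 := hmem q4 hq4
      have l1 := hlo q1 hq1; have l4 := hlo q4 hq4
      omega
    obtain ⟨b1, b2, b3, b4, b5, b6⟩ := hb
    have hcount := count_iff (fun p => decide (pvAt grid p.1 p.2 = m)) h w r0 c0 r1 c1
      b1 b2 b3 b4 b5 b6 (by rw [hc]; exact hlo)
    rw [hc] at hcount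
    rw [pvFindRectA]
    simp only [hcells, hc, List.isEmpty_cons, if_neg (by decide : ¬ (false = true))]
    rw [hmin, hmax, hminc, hmaxc]
    simp only [Option.getD_some]
    have hA : ((PySem.List.pyRange r0 (r1 + 1) 1).all (fun r =>
        (PySem.List.pyRange c0 (c1 + 1) 1).all (fun c => decide (pvAt grid r c = m))) = true)
        ↔ ∀ r ∈ PySem.List.pyRange r0 (r1 + 1) 1, ∀ c ∈ PySem.List.pyRange c0 (c1 + 1) 1,
            pvAt grid r c = m := by
      simp [List.all_eq_true]
    have hB : (∀ q ∈ pvBox r0 c0 r1 c1, (fun p => decide (pvAt grid p.1 p.2 = m)) q = true)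
        ↔ ∀ r ∈ PySem.List.pyRange r0 (r1 + 1) 1, ∀ c ∈ PySem.List.pyRange c0 (c1 + 1) 1,
            pvAt grid r c = m := by
      constructor
      · intro H r hr c hcm
        simpa using H (r, c) (by
          simp only [pvBox, List.mem_flatMap, List.mem_map]
          exact ⟨r, hr, c, hcm, rfl⟩)
      · intro H q hq
        simp only [pvBox, List.mem_flatMap, List.mem_map] at hq
        obtain ⟨r, hr, c, hcm, rfl⟩ := hq
        simpa using H r hr c hcm
    have halliff := hA.trans hB.symm
    have hn : (1 : Int) + t.length = ((p :: t).length : Int) := by simp; ring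
    by_cases hck : ∀ q ∈ pvBox r0 c0 r1 c1, (fun p => decide (pvAt grid p.1 p.2 = m)) q = true
    · rw [if_pos (halliff.mpr hck), if_pos (hn.symm ▸ hcount.mpr hck)]
    · rw [if_neg (fun hh => hck (halliff.mp hh)), if_neg (fun hh => hck (hcount.mp (hn ▸ hh)))]
def pvSet2 (g : List (List Int)) (q : Int × Int) (x : Int) : List (List Int) :=
  PySem.List.pySetD g q.1 (PySem.List.pySetD (PySem.List.pyGetD g q.1 []) q.2 x)

theorem myGetD {α : Type} (xs : List α) (i : Int) (h : 0 ≤ i) (d : α) :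
    PySem.List.pyGetD xs i d = xs.getD i.toNat d := by
  simp [PySem.List.pyGetD, PySem.List.pyGet?_of_nonneg xs h, List.getD_eq_getElem?_getD]

theorem foldSet_at (L : List (Int × Int)) (v : Int × Int → Int) (g : List (List Int))
    (hva : ∀ q ∈ L, 0 ≤ q.1 ∧ q.1.toNat < g.length ∧ 0 ≤ q.2 ∧
      q.2.toNat < (g.getD q.1.toNat []).length) :
    (L.foldl (fun g q => pvSet2 g q (v q)) g).length = g.length
    ∧ (∀ i : Nat, ((L.foldl (fun g q => pvSet2 g q (v q)) g).getD i []).length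
        = (g.getD i []).length)
    ∧ (∀ i j : Nat, ((L.foldl (fun g q => pvSet2 g q (v q)) g).getD i []).getD j 0
        = if ((i : Int), (j : Int)) ∈ L then v ((i : Int), (j : Int))
          else (g.getD i []).getD j 0) := by
  induction L generalizing g with
  | nil => simp
  | cons p t ih =>
    obtain ⟨hp1, hp2, hp3, hp4⟩ := hva p List.mem_cons_self
    have hset : pvSet2 g p (v p)
        = g.set p.1.toNat ((g.getD p.1.toNat []).set p.2.toNat (v p)) := by
      rw [pvSet2, PySem.List.pySetD_of_nonneg _ _ hp1, PySem.List.pySetD_of_nonneg _ _ hp3,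
        myGetD _ _ hp1]
    -- facts about one set step
    have hlen : (pvSet2 g p (v p)).length = g.length := by rw [hset]; simp
    have hrow : ∀ i : Nat, (pvSet2 g p (v p)).getD i []
        = if i = p.1.toNat then (g.getD p.1.toNat []).set p.2.toNat (v p)
          else g.getD i [] := by
      intro i
      rw [hset]
      by_cases hi : i = p.1.toNat
      · subst hi
        simp [List.getD_eq_getElem?_getD, hp2]
      · simp [List.getD_eq_getElem?_getD, List.getElem?_set_ne (fun e => hi e.symm), hi]
    have hrowlen : ∀ i : Nat, ((pvSet2 g p (v p)).getD i []).length = (g.getD i []).length := by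
      intro i
      rw [hrow i]
      by_cases hi : i = p.1.toNat <;> simp [hi]
    have hva' : ∀ q ∈ t, 0 ≤ q.1 ∧ q.1.toNat < (pvSet2 g p (v p)).length ∧ 0 ≤ q.2 ∧
        q.2.toNat < ((pvSet2 g p (v p)).getD q.1.toNat []).length := by
      intro q hq
      obtain ⟨a, b, c, d⟩ := hva q (List.mem_cons_of_mem _ hq)
      exact ⟨a, by rwa [hlen], c, by rwa [hrowlen]⟩
    obtain ⟨ih1, ih2, ih3⟩ := ih (pvSet2 g p (v p)) hva'
    refine ⟨?_, ?_, ?_⟩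
    · rw [List.foldl_cons, ih1, hlen]
    · intro i; rw [List.foldl_cons, ih2 i, hrowlen i]
    · intro i j
      rw [List.foldl_cons, ih3 i j]
      by_cases ht : ((i : Int), (j : Int)) ∈ t
      · rw [if_pos ht, if_pos (List.mem_cons_of_mem _ ht)]
      · rw [if_neg ht]
        by_cases hp : ((i : Int), (j : Int)) = p
        · rw [if_pos (by simp [hp])]
          have hi : i = p.1.toNat := by
            have := congrArg Prod.fst hp; simp at this; omega
          have hj : j = p.2.toNat := by
            have := congrArg Prod.snd hp; simp at this; omega
          rw [hrow i, if_pos hi, hp]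
          subst hi hj
          have hp4' : p.2.toNat < (g[p.1.toNat]?.getD []).length := by
            simpa [List.getD_eq_getElem?_getD] using hp4
          simp [List.getD_eq_getElem?_getD, hp4']
        · rw [if_neg (by simp [hp, ht]), hrow i]
          by_cases hi : i = p.1.toNat
          · have hj : ¬ j = p.2.toNat := by
              intro hj
              apply hp
              have : (p.1.toNat : Int) = p.1 := Int.toNat_of_nonneg hp1
              have : (p.2.toNat : Int) = p.2 := Int.toNat_of_nonneg hp3
              subst hi hj
              simp [Prod.ext_iff]; omega
            rw [if_pos hi]
            subst hi
            simp [List.getD_eq_getElem?_getD, List.getElem?_set_ne (fun e => hj e.symm)]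
          · rw [if_neg hi]

theorem mem_box (r0 c0 r1 c1 : Int) (q : Int × Int) :
    q ∈ pvBox r0 c0 r1 c1 ↔ r0 ≤ q.1 ∧ q.1 ≤ r1 ∧ c0 ≤ q.2 ∧ q.2 ≤ c1 := by
  cases q with
  | mk a b =>
    simp only [pvBox, List.mem_flatMap, List.mem_map, PySem.List.mem_pyRange_one, Prod.mk.injEq]
    constructor
    · rintro ⟨r, hr, c, hc, e1, e2⟩; omega
    · intro hb; exact ⟨a, by omega, b, by omega, rfl, rfl⟩

theorem foldl_nested {σ : Type} (R C : List Int) (f : σ → Int × Int → σ) (i : σ) :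
    R.foldl (fun s r => C.foldl (fun s c => f s (r, c)) s) i
    = (R.flatMap (fun r => C.map (fun c => (r, c)))).foldl f i := by
  rw [List.foldl_flatMap]
  exact PySem.List.foldl_congr_mem _ _ _ _ (fun s r _ => by rw [List.foldl_map])

theorem foldl_flag (L : List (Int × Int)) (C : Int × Int → Prop) [DecidablePred C] (b : Bool) :
    L.foldl (fun b q => if C q then b else false) b = (b && L.all (fun q => decide (C q))) := by
  induction L generalizing b with
  | nil => simp
  | cons p t ih =>
    rw [List.foldl_cons, List.all_cons]
    by_cases hC : C p
    · rw [if_pos hC, ih]; simp [hC]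
    · rw [if_neg hC, ih]; simp [hC]

theorem block_at (grid : List (List Int)) (r0 c0 r1 c1 : Int) (sym : Int → Int → Int × Int)
    (x y : Int) (h1 : r0 ≤ x) (h2 : x ≤ r1) (h3 : c0 ≤ y) (h4 : y ≤ c1) :
    pvAt (pvBlockB grid r0 c0 r1 c1 sym) (x - r0) (y - c0)
    = pvAt grid (sym x y).1 (sym x y).2 := by
  have hx : x - r0 = ((x - r0).toNat : Int) := by omega
  have hy : y - c0 = ((y - c0).toNat : Int) := by omega
  rw [pvAt, pvBlockB, hx, PySem.List.pyGetD_map_pyRange_one _ r0 (r1 + 1) _ _ (by omega)]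
  rw [show r0 + ((x - r0).toNat : Int) = x by omega]
  rw [hy, PySem.List.pyGetD_map_pyRange_one _ c0 (c1 + 1) _ _ (by omega)]
  rw [show c0 + ((y - c0).toNat : Int) = y by omega]

theorem tryFill_eq (grid : List (List Int)) (h w m r0 c0 r1 c1 : Int)
    (sym : Int → Int → Int × Int)
    (hh : h = (grid.length : Int))
    (hPre : ∀ row ∈ grid, w ≤ (row.length : Int))
    (b1 : 0 ≤ r0) (_b2 : r0 ≤ r1) (b3 : r1 < h) (b4 : 0 ≤ c0) (b5 : c0 ≤ c1) (b6 : c1 < w)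
    (hsym : ∀ r c, r0 ≤ r → r ≤ r1 → c0 ≤ c → c ≤ c1 →
      0 ≤ (sym r c).1 ∧ (sym r c).1 < h ∧ 0 ≤ (sym r c).2 ∧ (sym r c).2 < w) :
    pvTryFillA grid h w m r0 c0 r1 c1 sym = pvTryFillB grid m r0 c0 r1 c1 sym := by
  -- notation
  have einit : grid.map (fun row => PySem.List.slice row none none) = grid := by
    simp [PySem.List.slice_none_none]
  -- the pair fold over the box
  have e1 : (PySem.List.pyRange r0 (r1 + 1) 1).foldl (fun st r =>
      (PySem.List.pyRange c0 (c1 + 1) 1).foldl (fun (st : List (List Int) × Bool) c =>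
        if 0 ≤ (sym r c).1 ∧ (sym r c).1 < h ∧ 0 ≤ (sym r c).2 ∧ (sym r c).2 < w ∧
            pvAt grid (sym r c).1 (sym r c).2 ≠ m then
          (PySem.List.pySetD st.1 r
            (PySem.List.pySetD (PySem.List.pyGetD st.1 r []) c
              (pvAt grid (sym r c).1 (sym r c).2)), st.2)
        else (st.1, false)) st) (grid, true)
      = (pvBox r0 c0 r1 c1).foldl (fun (st : List (List Int) × Bool) q =>
        if 0 ≤ (sym q.1 q.2).1 ∧ (sym q.1 q.2).1 < h ∧ 0 ≤ (sym q.1 q.2).2 ∧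
            (sym q.1 q.2).2 < w ∧ pvAt grid (sym q.1 q.2).1 (sym q.1 q.2).2 ≠ m then
          (pvSet2 st.1 q (pvAt grid (sym q.1 q.2).1 (sym q.1 q.2).2), st.2)
        else (st.1, false)) (grid, true) := by
    exact foldl_nested (PySem.List.pyRange r0 (r1 + 1) 1) (PySem.List.pyRange c0 (c1 + 1) 1)
      (fun (st : List (List Int) × Bool) (q : Int × Int) =>
        if 0 ≤ (sym q.1 q.2).1 ∧ (sym q.1 q.2).1 < h ∧ 0 ≤ (sym q.1 q.2).2 ∧
            (sym q.1 q.2).2 < w ∧ pvAt grid (sym q.1 q.2).1 (sym q.1 q.2).2 ≠ m then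
          (pvSet2 st.1 q (pvAt grid (sym q.1 q.2).1 (sym q.1 q.2).2), st.2)
        else (st.1, false)) (grid, true)
  have e2 : (pvBox r0 c0 r1 c1).foldl (fun (st : List (List Int) × Bool) q =>
        if 0 ≤ (sym q.1 q.2).1 ∧ (sym q.1 q.2).1 < h ∧ 0 ≤ (sym q.1 q.2).2 ∧
            (sym q.1 q.2).2 < w ∧ pvAt grid (sym q.1 q.2).1 (sym q.1 q.2).2 ≠ m then
          (pvSet2 st.1 q (pvAt grid (sym q.1 q.2).1 (sym q.1 q.2).2), st.2)
        else (st.1, false)) (grid, true)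
      = ((pvBox r0 c0 r1 c1).foldl (fun g q =>
          if 0 ≤ (sym q.1 q.2).1 ∧ (sym q.1 q.2).1 < h ∧ 0 ≤ (sym q.1 q.2).2 ∧
              (sym q.1 q.2).2 < w ∧ pvAt grid (sym q.1 q.2).1 (sym q.1 q.2).2 ≠ m then
            pvSet2 g q (pvAt grid (sym q.1 q.2).1 (sym q.1 q.2).2) else g) grid,
         (pvBox r0 c0 r1 c1).foldl (fun b q =>
          if 0 ≤ (sym q.1 q.2).1 ∧ (sym q.1 q.2).1 < h ∧ 0 ≤ (sym q.1 q.2).2 ∧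
              (sym q.1 q.2).2 < w ∧ pvAt grid (sym q.1 q.2).1 (sym q.1 q.2).2 ≠ m then
            b else false) true) := by
    rw [PySem.List.foldl_congr_mem _ _ (fun (st : List (List Int) × Bool) q =>
        ((fun g (q : Int × Int) =>
          if 0 ≤ (sym q.1 q.2).1 ∧ (sym q.1 q.2).1 < h ∧ 0 ≤ (sym q.1 q.2).2 ∧
              (sym q.1 q.2).2 < w ∧ pvAt grid (sym q.1 q.2).1 (sym q.1 q.2).2 ≠ m then
            pvSet2 g q (pvAt grid (sym q.1 q.2).1 (sym q.1 q.2).2) else g) st.1 q,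
         (fun b (q : Int × Int) =>
          if 0 ≤ (sym q.1 q.2).1 ∧ (sym q.1 q.2).1 < h ∧ 0 ≤ (sym q.1 q.2).2 ∧
              (sym q.1 q.2).2 < w ∧ pvAt grid (sym q.1 q.2).1 (sym q.1 q.2).2 ≠ m then
            b else false) st.2 q)) _
      (by
        intro st q _
        by_cases hC : 0 ≤ (sym q.1 q.2).1 ∧ (sym q.1 q.2).1 < h ∧ 0 ≤ (sym q.1 q.2).2 ∧
            (sym q.1 q.2).2 < w ∧ pvAt grid (sym q.1 q.2).1 (sym q.1 q.2).2 ≠ m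
        · simp only [if_pos hC]
        · simp only [if_neg hC])]
    rw [PySem.List.foldl_prod_mk (f := fun g (q : Int × Int) =>
          if 0 ≤ (sym q.1 q.2).1 ∧ (sym q.1 q.2).1 < h ∧ 0 ≤ (sym q.1 q.2).2 ∧
              (sym q.1 q.2).2 < w ∧ pvAt grid (sym q.1 q.2).1 (sym q.1 q.2).2 ≠ m then
            pvSet2 g q (pvAt grid (sym q.1 q.2).1 (sym q.1 q.2).2) else g)
        (g := fun b (q : Int × Int) =>
          if 0 ≤ (sym q.1 q.2).1 ∧ (sym q.1 q.2).1 < h ∧ 0 ≤ (sym q.1 q.2).2 ∧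
              (sym q.1 q.2).2 < w ∧ pvAt grid (sym q.1 q.2).1 (sym q.1 q.2).2 ≠ m then
            b else false)]
  -- abbreviations
  set Box := pvBox r0 c0 r1 c1 with hBox
  set val := fun q : Int × Int => pvAt grid (sym q.1 q.2).1 (sym q.1 q.2).2 with hval
  set C := fun q : Int × Int => 0 ≤ (sym q.1 q.2).1 ∧ (sym q.1 q.2).1 < h ∧
      0 ≤ (sym q.1 q.2).2 ∧ (sym q.1 q.2).2 < w ∧ pvAt grid (sym q.1 q.2).1 (sym q.1 q.2).2 ≠ m
    with hC
  have hva : ∀ q ∈ Box, 0 ≤ q.1 ∧ q.1.toNat < grid.length ∧ 0 ≤ q.2 ∧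
      q.2.toNat < (grid.getD q.1.toNat []).length := by
    intro q hq
    obtain ⟨m1, m2, m3, m4⟩ := (mem_box r0 c0 r1 c1 q).mp hq
    have hq1 : 0 ≤ q.1 := by omega
    have hq2 : q.1.toNat < grid.length := by omega
    have hrowmem : grid.getD q.1.toNat [] ∈ grid := by
      rw [List.getD_eq_getElem _ _ hq2]
      exact List.getElem_mem hq2
    have := hPre _ hrowmem
    exact ⟨hq1, hq2, by omega, by omega⟩
  have hCval : ∀ q ∈ Box, C q ↔ val q ≠ m := by
    intro q hq
    obtain ⟨m1, m2, m3, m4⟩ := (mem_box r0 c0 r1 c1 q).mp hq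
    have := hsym q.1 q.2 m1 m2 m3 m4
    rw [hC, hval]
    constructor
    · intro hc; exact hc.2.2.2.2
    · intro hne; exact ⟨this.1, this.2.1, this.2.2.1, this.2.2.2, hne⟩
  have hAguard : ((Box.all (fun q => decide (C q))) = true) ↔ ∀ q ∈ Box, C q := by
    simp [List.all_eq_true]
  have hBguard : ((pvBlockB grid r0 c0 r1 c1 sym).all (fun row => row.all (fun v => v ≠ m))
      = true) ↔ ∀ q ∈ Box, val q ≠ m := by
    simp only [pvBlockB, List.all_map, List.all_eq_true, Function.comp_apply,
      PySem.List.mem_pyRange_one, decide_eq_true_eq]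
    constructor
    · intro H q hq
      obtain ⟨m1, m2, m3, m4⟩ := (mem_box r0 c0 r1 c1 q).mp hq
      exact H q.1 ⟨m1, by omega⟩ q.2 ⟨m3, by omega⟩
    · intro H r hr c hcm
      exact H (r, c) ((mem_box r0 c0 r1 c1 (r, c)).mpr ⟨hr.1, by omega, hcm.1, by omega⟩)
  simp only [pvTryFillA, pvTryFillB, einit, e1, e2]
  rw [foldl_flag Box C true]
  simp only [Bool.true_and]
  by_cases hall : ∀ q ∈ Box, val q ≠ m
  · have hCall : ∀ q ∈ Box, C q := fun q hq => (hCval q hq).mpr (hall q hq)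
    rw [if_pos (hAguard.mpr hCall), if_pos (hBguard.mpr hall)]
    rw [PySem.List.foldl_congr_mem Box _ (fun g q => pvSet2 g q (val q)) grid
      (fun g q hq => if_pos (hCall q hq))]
    obtain ⟨f1, f2, f3⟩ := foldSet_at Box val grid hva
    congr 1
    apply List.ext_getElem
    · rw [f1]
      simp [PySem.List.length_enumerate]
    · intro i hi1 hi2
      have higr : i < grid.length := by rw [← f1]; exact hi1
      have erow : (List.foldl (fun g q => pvSet2 g q (val q)) grid Box)[i].length
          = grid[i].length := by
        have e := f2 i
        rw [List.getD_eq_getElem _ _ hi1, List.getD_eq_getElem _ _ higr] at e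
        exact e
      apply List.ext_getElem
      · rw [erow]
        simp only [List.length_map, List.getElem_map, PySem.List.getElem_enumerate,
          PySem.List.length_enumerate]
      · intro j hj1 hj2
        have hjg : j < grid[i].length := by rw [← erow]; exact hj1
        have lhs : (List.foldl (fun g q => pvSet2 g q (val q)) grid Box)[i][j]
            = if ((i : Int), (j : Int)) ∈ Box then val ((i : Int), (j : Int))
              else (grid.getD i []).getD j 0 := by
          have e3 := f3 i j
          rw [List.getD_eq_getElem _ _ hi1, List.getD_eq_getElem _ _ hj1] at e3
          exact e3
        rw [lhs]
        simp only [List.getElem_map, PySem.List.getElem_enumerate, Int.zero_add]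
        have hgd : (grid.getD i []).getD j 0 = grid[i][j] := by
          rw [List.getD_eq_getElem _ _ higr, List.getD_eq_getElem _ _ hjg]
        by_cases hbx : ((i : Int), (j : Int)) ∈ Box
        · obtain ⟨m1, m2, m3, m4⟩ := (mem_box r0 c0 r1 c1 _).mp hbx
          rw [if_pos hbx, if_pos ⟨m1, m2, m3, m4⟩,
            block_at grid r0 c0 r1 c1 sym _ _ m1 m2 m3 m4]
        · rw [if_neg hbx, if_neg (fun hcc => hbx ((mem_box r0 c0 r1 c1 _).mpr hcc)), hgd]
  · rw [if_neg (fun hb => hall (fun q hq => (hCval q hq).mp ((hAguard.mp hb) q hq))),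
      if_neg (fun hb => hall (hBguard.mp hb))]

theorem rectA_bounds (grid : List (List Int)) (h w m r0 c0 r1 c1 : Int)
    (hr : pvFindRectA grid h w m = some (r0, c0, r1, c1)) :
    0 ≤ r0 ∧ r0 ≤ r1 ∧ r1 < h ∧ 0 ≤ c0 ∧ c0 ≤ c1 ∧ c1 < w := by
  rw [pvFindRectA] at hr
  cases hc : pvCellsA grid h w m with
  | nil => rw [hc] at hr; simp at hr
  | cons p t =>
    rw [hc] at hr
    simp only [List.isEmpty_cons, if_neg (by decide : ¬ (false = true))] at hr
    rw [List.map_cons, List.map_cons, PySem.List.min?_id_cons, PySem.List.max?_id_cons,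
      PySem.List.min?_id_cons, PySem.List.max?_id_cons] at hr
    simp only [Option.getD_some] at hr
    split at hr
    · -- the all-check passed; hr : some (...) = some (r0, c0, r1, c1)
      injection hr with hr
      obtain ⟨e0, e1, e2, e3⟩ : (List.map Prod.fst t).foldl min p.1 = r0 ∧
          (List.map Prod.snd t).foldl min p.2 = c0 ∧
          (List.map Prod.fst t).foldl max p.1 = r1 ∧
          (List.map Prod.snd t).foldl max p.2 = c1 := by
        refine ⟨congrArg Prod.fst hr, ?_, ?_, ?_⟩
        · exact congrArg (fun x => x.2.1) hr
        · exact congrArg (fun x => x.2.2.1) hr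
        · exact congrArg (fun x => x.2.2.2) hr
      have hmem : ∀ q ∈ p :: t, 0 ≤ q.1 ∧ q.1 < h ∧ 0 ≤ q.2 ∧ q.2 < w := by
        intro q hq
        rw [← hc, show pvCellsA grid h w m
          = (pvAllCells h w).filter (fun p => decide (pvAt grid p.1 p.2 = m))
          from L1 grid h w m] at hq
        exact (mem_allCells h w q).mp (List.mem_filter.mp hq).1
      have hmin : PySem.List.min? ((p :: t).map Prod.fst) (fun y => y) = some r0 := by
        rw [List.map_cons, PySem.List.min?_id_cons, e0]
      have hmax : PySem.List.max? ((p :: t).map Prod.fst) (fun y => y) = some r1 := by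
        rw [List.map_cons, PySem.List.max?_id_cons, e2]
      have hminc : PySem.List.min? ((p :: t).map Prod.snd) (fun y => y) = some c0 := by
        rw [List.map_cons, PySem.List.min?_id_cons, e1]
      have hmaxc : PySem.List.max? ((p :: t).map Prod.snd) (fun y => y) = some c1 := by
        rw [List.map_cons, PySem.List.max?_id_cons, e3]
      obtain ⟨q1, hq1, f1⟩ := List.mem_map.mp (PySem.List.min?_mem hmin)
      obtain ⟨q2, hq2, f2⟩ := List.mem_map.mp (PySem.List.max?_mem hmax)
      obtain ⟨q3, hq3, f3⟩ := List.mem_map.mp (PySem.List.min?_mem hminc)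
      obtain ⟨q4, hq4, f4⟩ := List.mem_map.mp (PySem.List.max?_mem hmaxc)
      have hle1 := PySem.List.min?_isMin hmin _ (List.mem_map_of_mem (f := Prod.fst) hq2)
      have hle2 := PySem.List.min?_isMin hminc _ (List.mem_map_of_mem (f := Prod.snd) hq4)
      have a1 := hmem q1 hq1; have a2 := hmem q2 hq2
      have a3 := hmem q3 hq3; have a4 := hmem q4 hq4
      omega
    · exact absurd hr (by simp)

theorem syms_eq (grid : List (List Int)) (h w m r0 c0 r1 c1 : Int)
    (hh : h = (grid.length : Int))
    (hPre : ∀ row ∈ grid, w ≤ (row.length : Int))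
    (b1 : 0 ≤ r0) (b2 : r0 ≤ r1) (b3 : r1 < h) (b4 : 0 ≤ c0) (b5 : c0 ≤ c1) (b6 : c1 < w) :
    (pvSyms h w).findSome? (fun s => pvTryFillA grid h w m r0 c0 r1 c1 s)
    = (pvSyms h w).findSome? (fun s => pvTryFillB grid m r0 c0 r1 c1 s) := by
  have t1 := tryFill_eq grid h w m r0 c0 r1 c1 (fun r c => (h - 1 - r, w - 1 - c)) hh hPre
    b1 b2 b3 b4 b5 b6 (by intro r c h1 h2 h3 h4; simp; omega)
  have t2 := tryFill_eq grid h w m r0 c0 r1 c1 (fun r c => (h - 1 - r, c)) hh hPre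
    b1 b2 b3 b4 b5 b6 (by intro r c h1 h2 h3 h4; simp; omega)
  have t3 := tryFill_eq grid h w m r0 c0 r1 c1 (fun r c => (r, w - 1 - c)) hh hPre
    b1 b2 b3 b4 b5 b6 (by intro r c h1 h2 h3 h4; simp; omega)
  simp only [pvSyms, List.findSome?_cons, List.findSome?_nil, t1, t2, t3]

theorem loop_eq (grid : List (List Int)) (h w : Int)
    (hh : h = (grid.length : Int))
    (hPre : ∀ row ∈ grid, w ≤ (row.length : Int)) :
    ∀ masks : List Int, pvLoopA grid h w masks
      = pvLoopB grid h w (pvStatsB grid h w) masks := by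
  intro masks
  induction masks with
  | nil => rfl
  | cons m rest ih =>
    rw [pvLoopA, pvLoopB, rect_eq grid h w m]
    cases hg : (pvStatsB grid h w).get? m with
    | none => simpa [hg] using ih
    | some s =>
      obtain ⟨n, r0, r1, c0, c1⟩ := s
      by_cases hn : n = (r1 - r0 + 1) * (c1 - c0 + 1)
      · simp only [if_pos hn, if_neg (by omega : ¬ n ≠ (r1 - r0 + 1) * (c1 - c0 + 1))]
        have hrect : pvFindRectA grid h w m = some (r0, c0, r1, c1) := by
          rw [rect_eq grid h w m, hg]
          simp [hn]
        obtain ⟨b1, b2, b3, b4, b5, b6⟩ := rectA_bounds grid h w m r0 c0 r1 c1 hrect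
        rw [syms_eq grid h w m r0 c0 r1 c1 hh hPre b1 b2 b3 b4 b5 b6]
        cases (pvSyms h w).findSome? (fun s => pvTryFillB grid m r0 c0 r1 c1 s) with
        | none => exact ih
        | some res => rfl
      · simp only [if_neg hn, if_pos (by omega : n ≠ (r1 - r0 + 1) * (c1 - c0 + 1))]
        exact ih

theorem main_eq (grid : List (List Int)) (hPre : Pre_fill_by_symmetry grid) :
    fill_by_symmetry grid = fill_by_symmetry_alt grid := by
  rw [fill_by_symmetry, fill_by_symmetry_alt]
  by_cases hempty : grid.isEmpty ∨ (PySem.List.pyGetD grid 0 []).isEmpty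
  · rw [if_pos hempty, if_pos hempty]
  · rw [if_neg hempty, if_neg hempty]
    apply loop_eq
    · rfl
    · intro row hrow
      exact_mod_cast hPre row hrow

-- ===== VERDICT (by name: the statement is the Claim_ definition above) =====
theorem fill_by_symmetry_spec : Claim_equal_fill_by_symmetry := by
  intro grid _ hPre
  unfold Spec_fill_by_symmetry
  exact main_eq grid hPre
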